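-- pv_equiv track=rewrite | github.com/ninarescic/epi-netrate | scripts/run_higgs_experiment_grid.py | split_edges_for_curved_arrows
-- ===== SOURCE A (Python) =====
-- def split_edges_for_curved_arrows(edges: list[tuple[str, str]]) -> tuple[list[tuple[str, str]], list[tuple[str, str]], list[tuple[str, str]]]:
--     edge_set = set(edges)
--     single: list[tuple[str, str]] = []
--     mutual_pos: list[tuple[str, str]] = []
--     mutual_neg: list[tuple[str, str]] = []
--     seen_pairs: set[tuple[str, str]] = set()
--     for u, v in edges:
--         if (v, u) in edge_set:
--             pair = tuple(sorted((u, v)))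
--             if pair in seen_pairs:
--                 continue
--             seen_pairs.add(pair)
--             a, b = pair
--             if (a, b) in edge_set:
--                 mutual_pos.append((a, b))
--             if (b, a) in edge_set:
--                 mutual_neg.append((b, a))
--         else:
--             single.append((u, v))
--     return single, mutual_pos, mutual_neg
-- ===== SOURCE B (Python) =====
-- def split_edges_for_curved_arrows(edges: list[tuple[str, str]]) -> tuple[list[tuple[str, str]], list[tuple[str, str]], list[tuple[str, str]]]:
--     # Group edges by their undirected (canonical) pair, recording which of the
--     # two directions occur; a pair is mutual iff it is a self-loop or both
--     # directions were seen.  No reverse-membership test in an edge set is needed.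
--     flags: dict[tuple[str, str], list[bool]] = {}
--     for u, v in edges:
--         key = (u, v) if u <= v else (v, u)
--         f = flags.setdefault(key, [False, False])
--         if u <= v:
--             f[0] = True
--         else:
--             f[1] = True
--
--     def is_mutual(key: tuple[str, str]) -> bool:
--         f = flags[key]
--         return key[0] == key[1] or (f[0] and f[1])
--
--     single = [(u, v) for (u, v) in edges
--               if not is_mutual((u, v) if u <= v else (v, u))]
--     mutual_pos = [k for k in flags if is_mutual(k)]
--     mutual_neg = [(b, a) for (a, b) in mutual_pos]
--     return single, mutual_pos, mutual_neg
-- ===== Notes on version B (the rewrite author's own statement) =====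
-- stated objective: alternative
-- what changed: Replaces A's precomputed edge set with reverse-membership tests and a seen-set dedup loop by a group-by: one pass builds a dict from each undirected canonical pair to which of its two directions occur, mutuality is then read off the aggregated flags (self-loop or both directions seen), and mutual_pos is the dict's keys filtered by mutuality.
import Mathlib
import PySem

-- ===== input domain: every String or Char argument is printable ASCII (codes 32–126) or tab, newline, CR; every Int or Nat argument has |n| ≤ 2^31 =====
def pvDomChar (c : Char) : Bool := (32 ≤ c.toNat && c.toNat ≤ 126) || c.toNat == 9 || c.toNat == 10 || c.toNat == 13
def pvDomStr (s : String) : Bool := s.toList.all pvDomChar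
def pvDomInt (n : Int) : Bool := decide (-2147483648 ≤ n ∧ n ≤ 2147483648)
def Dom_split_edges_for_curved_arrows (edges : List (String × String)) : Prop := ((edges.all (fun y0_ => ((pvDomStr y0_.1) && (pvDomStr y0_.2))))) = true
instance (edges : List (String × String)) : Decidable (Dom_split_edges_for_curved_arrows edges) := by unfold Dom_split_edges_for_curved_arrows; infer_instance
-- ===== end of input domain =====

-- B replaces A's reverse-membership tests in a precomputed edge set by a group-by dict from
-- undirected canonical pairs to direction flags; objective: alternative. No side effects.

-- ===== PORT A =====
-- loop body of A's single for-loop over edges (state: single, mutual_pos, mutual_neg, seen_pairs)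
def pvStepA (edge_set : PySem.Set (String × String))
    (st : List (String × String) × List (String × String) × List (String × String) × PySem.Set (String × String))
    (e : String × String) :
    List (String × String) × List (String × String) × List (String × String) × PySem.Set (String × String) :=
  let u := e.1; let v := e.2
  if edge_set.contains (v, u) then
    -- pair = tuple(sorted((u, v)))
    let pair := if u ≤ v then (u, v) else (v, u)
    if st.2.2.2.contains pair then st
    else
      let seen := st.2.2.2.add pair
      let a := pair.1; let b := pair.2
      let mpos := if edge_set.contains (a, b) then st.2.1 ++ [(a, b)] else st.2.1
      let mneg := if edge_set.contains (b, a) then st.2.2.1 ++ [(b, a)] else st.2.2.1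
      (st.1, mpos, mneg, seen)
  else
    (st.1 ++ [(u, v)], st.2.1, st.2.2.1, st.2.2.2)

def split_edges_for_curved_arrows (edges : List (String × String)) : (List (String × String)) × (List (String × String)) × (List (String × String)) :=
  let edge_set := PySem.Set.ofList edges
  let r := edges.foldl (pvStepA edge_set) ([], [], [], PySem.Set.empty)
  (r.1, r.2.1, r.2.2.1)

-- ===== PORT B =====
-- key = (u, v) if u <= v else (v, u)
def pvK (e : String × String) : String × String := if e.1 ≤ e.2 then e else (e.2, e.1)

-- body of B's grouping loop: f = flags.setdefault(key, [False, False]); set the direction flag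
def pvBuildFlags (d : PySem.Dict (String × String) (Bool × Bool)) (e : String × String) :
    PySem.Dict (String × String) (Bool × Bool) :=
  let f := d.getD (pvK e) (false, false)
  d.insert (pvK e) (if e.1 ≤ e.2 then (true, f.2) else (f.1, true))

-- is_mutual(key): self-loop or both directions seen
def pvIsMutual (flags : PySem.Dict (String × String) (Bool × Bool)) (k : String × String) : Bool :=
  let f := flags.getD k (false, false)
  k.1 == k.2 || (f.1 && f.2)

def split_edges_for_curved_arrows_alt (edges : List (String × String)) : (List (String × String)) × (List (String × String)) × (List (String × String)) :=
  let flags := edges.foldl pvBuildFlags PySem.Dict.empty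
  let single := edges.filter (fun e => !(pvIsMutual flags (pvK e)))
  let mutual_pos := flags.keys.filter (fun k => pvIsMutual flags k)
  (single, mutual_pos, mutual_pos.map (fun p => (p.2, p.1)))

-- ===== PRECONDITION & SPEC =====
def Spec_split_edges_for_curved_arrows (edges : List (String × String)) (out : (List (String × String)) × (List (String × String)) × (List (String × String))) : Prop := out = split_edges_for_curved_arrows_alt edges
instance (edges : List (String × String)) (out : (List (String × String)) × (List (String × String)) × (List (String × String))) : Decidable (Spec_split_edges_for_curved_arrows edges out) := by unfold Spec_split_edges_for_curved_arrows; infer_instance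

-- ===== CLAIM (what is proved, stated in full; the proofs are below) =====
def Claim_equal_split_edges_for_curved_arrows : Prop := ∀ (edges : List (String × String)), Dom_split_edges_for_curved_arrows edges → Spec_split_edges_for_curved_arrows edges (split_edges_for_curved_arrows edges)

-- ===== LEMMAS AND PROOFS =====

-- proof-side collector: A's mutual branch alone (state: mutual_pos, seen)
def pvCollect (edge_set : PySem.Set (String × String))
    (st : List (String × String) × PySem.Set (String × String))
    (e : String × String) :
    List (String × String) × PySem.Set (String × String) :=
  if edge_set.contains (e.2, e.1) then
    let key := if e.1 ≤ e.2 then (e.1, e.2) else (e.2, e.1)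
    if st.2.contains key then st else (st.1 ++ [key], st.2.add key)
  else st

-- Invariant: running A's loop from a state whose mutual_neg is the swap-image of its mutual_pos
-- yields single ++ filtered singles, the collector's mutual_pos, its swap-image, and its seen.
lemma pv_loop_eq (edges : List (String × String)) :
    ∀ (xs : List (String × String)), (∀ e ∈ xs, e ∈ edges) →
    ∀ (sg mp : List (String × String)) (seen : PySem.Set (String × String)),
    xs.foldl (pvStepA (PySem.Set.ofList edges)) (sg, mp, mp.map (fun p => (p.2, p.1)), seen) =
      (sg ++ xs.filter (fun e => !((PySem.Set.ofList edges).contains (e.2, e.1))),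
       (xs.foldl (pvCollect (PySem.Set.ofList edges)) (mp, seen)).1,
       ((xs.foldl (pvCollect (PySem.Set.ofList edges)) (mp, seen)).1).map (fun p => (p.2, p.1)),
       (xs.foldl (pvCollect (PySem.Set.ofList edges)) (mp, seen)).2) := by
  intro xs
  induction xs with
  | nil => intro _ sg mp seen; simp
  | cons x xs ih =>
    intro h sg mp seen
    have hx : x ∈ edges := h x (List.mem_cons_self)
    have hx' : (PySem.Set.ofList edges).contains (x.1, x.2) = true := by
      rw [PySem.Set.contains_iff, PySem.Set.mem_ofList]; exact hx
    have hxs : ∀ e ∈ xs, e ∈ edges := fun e he => h e (List.mem_cons_of_mem _ he)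
    by_cases hrev : (PySem.Set.ofList edges).contains (x.2, x.1) = true
    · by_cases hle : x.1 ≤ x.2
      · by_cases hseen : seen.contains (x.1, x.2) = true
        · simp only [List.foldl_cons, pvStepA, pvCollect, hrev, hle, if_true, hseen,
            List.filter_cons, Bool.not_eq_true']
          rw [ih hxs sg mp seen]
          simp
        · simp only [List.foldl_cons, pvStepA, pvCollect, hrev, hle, if_true, hseen,
            Bool.false_eq_true, if_false, hx', List.filter_cons, Bool.not_eq_true']
          have := ih hxs sg (mp ++ [(x.1, x.2)]) (seen.add (x.1, x.2))
          simp only [List.map_append, List.map_cons, List.map_nil] at this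
          rw [this]
          simp
      · by_cases hseen : seen.contains (x.2, x.1) = true
        · simp only [List.foldl_cons, pvStepA, pvCollect, hrev, hle, if_true, if_false, hseen,
            List.filter_cons, Bool.not_eq_true']
          rw [ih hxs sg mp seen]
          simp
        · simp only [List.foldl_cons, pvStepA, pvCollect, hrev, hle, if_true, if_false, hseen,
            Bool.false_eq_true, hx', List.filter_cons, Bool.not_eq_true']
          have := ih hxs sg (mp ++ [(x.2, x.1)]) (seen.add (x.2, x.1))
          simp only [List.map_append, List.map_cons, List.map_nil] at this
          rw [this]
          simp
    · simp only [Bool.not_eq_true] at hrev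
      simp only [List.foldl_cons, pvStepA, pvCollect, hrev, Bool.false_eq_true, if_false,
        List.filter_cons, Bool.not_eq_true']
      have := ih hxs (sg ++ [(x.1, x.2)]) mp seen
      rw [this]
      simp

-- what B's grouping dict holds at each key: a direction flag is set iff some edge of that
-- canonical key with that direction occurs
lemma pv_flags_getD :
    ∀ (xs : List (String × String)) (d : PySem.Dict (String × String) (Bool × Bool)) (k : String × String),
    (xs.foldl pvBuildFlags d).getD k (false, false) =
      ((d.getD k (false, false)).1 || xs.any (fun e => pvK e == k && decide (e.1 ≤ e.2)),
       (d.getD k (false, false)).2 || xs.any (fun e => pvK e == k && !decide (e.1 ≤ e.2))) := by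
  intro xs
  induction xs with
  | nil => intro d k; simp
  | cons x xs ih =>
    intro d k
    simp only [List.foldl_cons, List.any_cons]
    rw [ih]
    simp only [pvBuildFlags, PySem.Dict.getD_insert]
    by_cases hk : k = pvK x
    · subst hk
      by_cases hle : x.1 ≤ x.2 <;> simp [hle, Bool.or_comm]
    · have hne : ¬ (pvK x == k) = true := by simp [beq_iff_eq]; exact fun h => hk h.symm
      simp [hk, hne]

-- mutuality read off the aggregated flags = reverse membership, for any edge of the list
lemma pv_mutual_char (edges : List (String × String)) (e : String × String) (he : e ∈ edges) :
    pvIsMutual (edges.foldl pvBuildFlags PySem.Dict.empty) (pvK e) =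
      (PySem.Set.ofList edges).contains (e.2, e.1) := by
  obtain ⟨u, v⟩ := e
  by_cases heq : u = v
  · subst heq
    have hc : (PySem.Set.ofList edges).contains (u, u) = true := by
      rw [PySem.Set.contains_iff, PySem.Set.mem_ofList]; exact he
    rw [hc]
    simp [pvIsMutual, pvK]
  · simp only [pvIsMutual, pv_flags_getD, PySem.Dict.getD_empty, Bool.false_or]
    rw [Bool.eq_iff_iff]
    by_cases hle : u ≤ v
    · have hk : pvK (u, v) = (u, v) := by simp [pvK, hle]
      have hvu : ¬ v ≤ u := not_le_of_gt (lt_of_le_of_ne hle heq)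
      rw [hk]
      simp only [Bool.or_eq_true, Bool.and_eq_true, List.any_eq_true, beq_iff_eq,
        decide_eq_true_eq, Bool.not_eq_eq_eq_not, Bool.not_true, decide_eq_false_iff_not,
        PySem.Set.contains_iff, PySem.Set.mem_ofList]
      constructor
      · rintro (habs | ⟨-, ⟨x, hx, hkx, hxle⟩⟩)
        · exact absurd habs heq
        · have : (x.2, x.1) = (u, v) := by rw [← hkx]; simp [pvK, hxle]
          obtain ⟨h1, h2⟩ := Prod.mk.injEq .. ▸ this
          have : x = (v, u) := by cases x; simp_all
          rwa [this] at hx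
      · intro hvu'
        refine Or.inr ⟨⟨(u, v), he, hk, hle⟩, ⟨(v, u), hvu', ?_, hvu⟩⟩
        simp [pvK, hvu]
    · have hvle : v ≤ u := le_of_not_ge hle
      have hk : pvK (u, v) = (v, u) := by simp [pvK, hle]
      rw [hk]
      simp only [Bool.or_eq_true, Bool.and_eq_true, List.any_eq_true, beq_iff_eq,
        decide_eq_true_eq, Bool.not_eq_eq_eq_not, Bool.not_true, decide_eq_false_iff_not,
        PySem.Set.contains_iff, PySem.Set.mem_ofList]
      constructor
      · rintro (habs | ⟨⟨x, hx, hkx, hxle⟩, -⟩)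
        · exact absurd habs.symm heq
        · have : x = (v, u) := by rw [← hkx]; simp [pvK, hxle]
          rwa [this] at hx
      · intro hvu'
        refine Or.inr ⟨⟨(v, u), hvu', by simp [pvK, hvle], hvle⟩, ⟨(u, v), he, hk, hle⟩⟩

-- a first-encounter dedup loop over canonical keys, filtered by any key predicate,
-- is the filtered deduplicated key list
lemma pv_dedup_fold (m : (String × String) → Bool) :
    ∀ (xs : List (String × String)) (acc : List (String × String)) (s : PySem.Set (String × String)),
    (xs.foldl (fun st e => if m (pvK e) then
        (if PySem.Set.contains st.2 (pvK e) then st else (st.1 ++ [pvK e], PySem.Set.add st.2 (pvK e)))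
      else st) (acc, s)).1
    = acc ++ (PySem.Set.ofList (xs.map pvK)).filter (fun k => m k && !(PySem.Set.contains s k)) := by
  intro xs
  induction xs with
  | nil => intro acc s; simp
  | cons x xs ih =>
    intro acc s
    simp only [List.foldl_cons, List.map_cons, PySem.Set.ofList_cons, List.filter_cons]
    by_cases hm : m (pvK x) = true
    · by_cases hc : PySem.Set.contains s (pvK x) = true
      · rw [if_pos hm, if_pos hc, ih]
        have hpk : (m (pvK x) && !PySem.Set.contains s (pvK x)) = false := by rw [hc]; simp
        rw [hpk]
        simp only [Bool.false_eq_true, if_false]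
        congr 1
        rw [PySem.Set.discard, List.filter_filter]
        apply List.filter_congr
        intro y hy
        by_cases hyk : y = pvK x
        · subst hyk; simp only [beq_self_eq_true, Bool.not_true]
          rw [hc]; simp
        · simp [hyk]
      · rw [if_pos hm, if_neg hc, ih]
        have hpk : (m (pvK x) && !PySem.Set.contains s (pvK x)) = true := by rw [hm, Bool.eq_false_iff.mpr hc]; simp
        rw [hpk]
        simp only [if_true, List.append_assoc, List.singleton_append]
        congr 2
        rw [PySem.Set.discard, List.filter_filter]
        apply List.filter_congr
        intro y hy
        have hadd : PySem.Set.add s (pvK x) = s ++ [pvK x] := by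
          apply PySem.Set.add_of_not_mem
          intro hmem; exact hc ((PySem.Set.contains_iff s (pvK x)).mpr hmem)
        by_cases hyk : y = pvK x
        · subst hyk
          rw [Bool.eq_iff_iff]
          simp [hadd]
        · rw [Bool.eq_iff_iff]
          have : PySem.Set.contains (PySem.Set.add s (pvK x)) y = PySem.Set.contains s y := by
            rw [Bool.eq_iff_iff]
            simp [PySem.Set.mem_add, hyk]
          simp [hyk]
    · rw [if_neg hm, ih]
      have hpk : (m (pvK x) && !PySem.Set.contains s (pvK x)) = false := by
        simp only [Bool.eq_false_iff] at hm ⊢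
        intro h; exact hm (Bool.and_elim_left h)
      rw [hpk]
      simp only [Bool.false_eq_true, if_false]
      congr 1
      rw [PySem.Set.discard, List.filter_filter]
      apply List.filter_congr
      intro y hy
      by_cases hyk : y = pvK x
      · subst hyk
        simp only [beq_self_eq_true, Bool.not_true]
        rw [Bool.eq_false_iff.mpr hm]; simp
      · simp [hyk]

-- B's dict keys are the deduplicated canonical keys in first-encounter order
lemma pv_flags_keys (edges : List (String × String)) :
    (edges.foldl pvBuildFlags PySem.Dict.empty).keys = PySem.Set.ofList (edges.map pvK) := by
  have h : edges.foldl pvBuildFlags PySem.Dict.empty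
      = edges.foldl (fun d e => d.insert (pvK e)
          (if e.1 ≤ e.2 then (true, (d.getD (pvK e) (false, false)).2)
           else ((d.getD (pvK e) (false, false)).1, true))) PySem.Dict.empty := rfl
  rw [h, PySem.Dict.keys_foldl_insert_key]
  simp [PySem.Set.update_nil_left]

-- ===== VERDICT (by name: the statement is the Claim_ definition above) =====
theorem split_edges_for_curved_arrows_spec : Claim_equal_split_edges_for_curved_arrows := by
  intro edges _
  show _ = _
  have h := pv_loop_eq edges edges (fun e he => he) [] [] PySem.Set.empty
  simp only [List.map_nil, List.nil_append] at h
  simp only [split_edges_for_curved_arrows, split_edges_for_curved_arrows_alt, h]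
  have hP : (edges.foldl (pvCollect (PySem.Set.ofList edges)) ([], PySem.Set.empty)).1
      = (edges.foldl pvBuildFlags PySem.Dict.empty).keys.filter
          (fun k => pvIsMutual (edges.foldl pvBuildFlags PySem.Dict.empty) k) := by
    rw [PySem.List.foldl_congr_mem edges _
      (fun st e => if pvIsMutual (edges.foldl pvBuildFlags PySem.Dict.empty) (pvK e) then
        (if PySem.Set.contains st.2 (pvK e) then st
         else (st.1 ++ [pvK e], PySem.Set.add st.2 (pvK e)))
      else st) ([], PySem.Set.empty) ?_]
    · rw [pv_dedup_fold]
      simp [pv_flags_keys]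
    · intro st e he
      show pvCollect (PySem.Set.ofList edges) st e =
        if pvIsMutual (edges.foldl pvBuildFlags PySem.Dict.empty) (pvK e) then
          (if PySem.Set.contains st.2 (pvK e) then st
           else (st.1 ++ [pvK e], PySem.Set.add st.2 (pvK e)))
        else st
      rw [pvCollect, pv_mutual_char edges e he]
      rfl
  rw [hP]
  have hflt : edges.filter (fun e => !((PySem.Set.ofList edges).contains (e.2, e.1)))
      = edges.filter (fun e => !(pvIsMutual (edges.foldl pvBuildFlags PySem.Dict.empty) (pvK e))) := by
    apply List.filter_congr
    intro e he
    rw [pv_mutual_char edges e he]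
  rw [hflt]
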